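-- pv_equiv track=rewrite | github.com/fabianpradod/proyecto2-cyk | cnf.py | _compute_nullable_nonterminals
-- ===== SOURCE A (Python) =====
-- from typing import DefaultDict, Dict, Iterable, List, Set, Tuple
--
-- Symbol = str
--
-- ProductionRHS = Tuple[Symbol, ...]
--
-- def _compute_nullable_nonterminals(
--     productions: Dict[Symbol, Set[ProductionRHS]]
-- ) -> Set[Symbol]:
--     """
--     Gather the fixed-point set of nullable non-terminals
--
--     A non-terminal is nullable if it can derive the empty string
--     """
--
--     nullable: Set[Symbol] = set()
--
--     # add all non-terminals that explicitly contain an empty production.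
--     for lhs, rhs_set in productions.items():
--         if () in rhs_set:
--             nullable.add(lhs)
--
--     # Keep expanding the set until no new nullable non-terminals are found
--     changed = True
--     while changed:
--         changed = False
--         for lhs, rhs_set in productions.items():
--             if lhs in nullable:
--                 continue
--             for rhs in rhs_set:
--                 if rhs and all(symbol in nullable for symbol in rhs):
--                     nullable.add(lhs)
--                     changed = True
--                     break
--
--     return nullable
-- ===== SOURCE B (Python) =====
-- def _compute_nullable_nonterminals(productions):
--     """Counter / reverse-index propagation: each distinct nonempty right-hand
--     side keeps one counter of its not-yet-nullable symbol occurrences, and a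
--     reverse occurrence index maps a symbol to the right-hand sides containing
--     it.  A production's readiness is then a counter == 0 test, and when a
--     symbol becomes nullable only the counters of the right-hand sides that
--     actually contain it are decremented -- no rescanning of symbols."""
--     nullable = set()
--     for lhs, rhs_set in productions.items():
--         if () in rhs_set:
--             nullable.add(lhs)
--     counters = {}   # rhs tuple -> occurrences of not-yet-nullable symbols in it
--     occ = {}        # symbol -> rhs tuples containing it, once per occurrence
--     table = []      # the still-undecided productions, with their nonempty rhs
--     for lhs, rhs_set in productions.items():
--         rhs_list = [rhs for rhs in rhs_set if rhs]
--         for rhs in rhs_list: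
--             if rhs not in counters:
--                 c = 0
--                 for sym in rhs:
--                     if sym not in nullable:
--                         occ.setdefault(sym, []).append(rhs)
--                         c += 1
--                 counters[rhs] = c
--         if rhs_list and lhs not in nullable:
--             table.append((lhs, rhs_list))
--     changed = True
--     while changed:
--         changed = False
--         for lhs, rhs_list in table:
--             if lhs in nullable:
--                 continue
--             if any(counters[rhs] == 0 for rhs in rhs_list):
--                 nullable.add(lhs)
--                 changed = True
--                 for rhs in occ.get(lhs, []):
--                     counters[rhs] -= 1
--     return nullable
-- ===== Notes on version B (the rewrite author's own statement) =====
-- stated objective: alternative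
-- what changed: Instead of rescanning every right-hand side's symbols against the nullable set each sweep, B precomputes one counter per distinct nonempty right-hand side (its not-yet-nullable symbol occurrences) plus a reverse occurrence index, so readiness is a counter==0 test and becoming nullable decrements exactly the affected counters.
import Mathlib
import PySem

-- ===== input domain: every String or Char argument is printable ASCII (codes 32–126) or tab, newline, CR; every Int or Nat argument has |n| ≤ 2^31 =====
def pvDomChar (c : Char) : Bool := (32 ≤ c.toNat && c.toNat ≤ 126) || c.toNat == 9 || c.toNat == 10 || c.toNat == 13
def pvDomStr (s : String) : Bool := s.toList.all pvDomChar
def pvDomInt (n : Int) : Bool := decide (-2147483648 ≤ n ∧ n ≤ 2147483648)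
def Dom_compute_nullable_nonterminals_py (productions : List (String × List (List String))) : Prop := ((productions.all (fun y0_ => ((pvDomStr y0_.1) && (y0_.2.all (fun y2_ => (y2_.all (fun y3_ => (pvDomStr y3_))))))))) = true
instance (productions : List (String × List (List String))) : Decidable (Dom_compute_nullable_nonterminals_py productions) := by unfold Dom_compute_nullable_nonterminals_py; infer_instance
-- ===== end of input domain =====

-- B replaces A's per-sweep rescanning of every right-hand side by per-RHS counters of
-- not-yet-nullable symbol occurrences plus a reverse occurrence index that decrements
-- exactly the affected counters when a symbol becomes nullable (objective: alternative).

-- ===== PORT A =====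
-- first loop: add every lhs with an explicit empty production
def pvInitA (s : PySem.Set String) : List (String × List (List String)) → PySem.Set String
  | [] => s
  | p :: rest => pvInitA (if p.2.contains ([] : List String) then PySem.Set.add s p.1 else s) rest

-- 'rhs and all(symbol in nullable for symbol in rhs)' for some rhs in rhs_set (break = any)
def pvCondA (s : PySem.Set String) (rhss : List (List String)) : Bool :=
  rhss.any (fun r => !r.isEmpty && r.all (fun sym => PySem.Set.contains s sym))

-- one 'for lhs, rhs_set in productions.items()' body of the while loop (b = changed)
def pvPassA (s : PySem.Set String) (b : Bool) : List (String × List (List String)) → PySem.Set String × Bool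
  | [] => (s, b)
  | p :: rest =>
    if PySem.Set.contains s p.1 then pvPassA s b rest
    else if pvCondA s p.2 then pvPassA (PySem.Set.add s p.1) true rest
    else pvPassA s b rest

-- the 'while changed' loop; fuel: a changed round strictly grows the nullable set, whose
-- elements are lhs's of the production list, so productions.length + 1 rounds always
-- suffice and the fuel-0 case is never reached
def pvLoopA (prods : List (String × List (List String))) : Nat → PySem.Set String → PySem.Set String
  | 0, s => s
  | n+1, s =>
    let r := pvPassA s false prods
    if r.2 then pvLoopA prods n r.1 else r.1

def compute_nullable_nonterminals_py (productions : List (String × List (List String))) : List String :=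
  pvLoopA productions (productions.length + 1) (pvInitA PySem.Set.empty productions)

-- ===== PORT B =====
-- B's first loop (same epsilon pass as A's first loop)
def pvEpsB (s : PySem.Set String) : List (String × List (List String)) → PySem.Set String
  | [] => s
  | p :: rest => pvEpsB (if p.2.contains ([] : List String) then PySem.Set.add s p.1 else s) rest

-- 'for sym in rhs: if sym not in nullable: occ.setdefault(sym, []).append(rhs); c += 1'
def pvScanSym (nul : PySem.Set String) (r : List String)
    (st : PySem.Dict String (List (List String)) × Int) (sym : String) :
    PySem.Dict String (List (List String)) × Int :=
  if PySem.Set.contains nul sym then st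
  else (st.1.modify sym [] (fun l => l ++ [r]), st.2 + 1)

-- 'if rhs not in counters: … ; counters[rhs] = c'
def pvScanRhs (nul : PySem.Set String)
    (st : PySem.Dict (List String) Int × PySem.Dict String (List (List String)))
    (r : List String) : PySem.Dict (List String) Int × PySem.Dict String (List (List String)) :=
  if st.1.contains r then st
  else
    let oc := r.foldl (pvScanSym nul r) (st.2, 0)
    (st.1.insert r oc.2, oc.1)

-- the build loop: counters, occurrence index, and the table of undecided productions
def pvBuildB (nul : PySem.Set String)
    (cs : PySem.Dict (List String) Int) (occ : PySem.Dict String (List (List String)))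
    (table : List (String × List (List String))) :
    List (String × List (List String)) →
      PySem.Dict (List String) Int × PySem.Dict String (List (List String)) × List (String × List (List String))
  | [] => (cs, occ, table)
  | p :: rest =>
    let rl := p.2.filter (fun r => !r.isEmpty)
    let co := rl.foldl (pvScanRhs nul) (cs, occ)
    pvBuildB nul co.1 co.2
      (if !rl.isEmpty && !PySem.Set.contains nul p.1 then table ++ [(p.1, rl)] else table) rest

-- 'for rhs in occ.get(lhs, []): counters[rhs] -= 1'
def pvDecr (cs : PySem.Dict (List String) Int) (L : List (List String)) : PySem.Dict (List String) Int :=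
  L.foldl (fun d r => d.insert r (d.getD r 0 - 1)) cs

-- one 'for lhs, rhs_list in table' body of the while loop (b = changed)
def pvPassB (occ : PySem.Dict String (List (List String)))
    (s : PySem.Set String) (cs : PySem.Dict (List String) Int) (b : Bool) :
    List (String × List (List String)) → PySem.Set String × PySem.Dict (List String) Int × Bool
  | [] => (s, cs, b)
  | p :: rest =>
    if PySem.Set.contains s p.1 then pvPassB occ s cs b rest
    else if p.2.any (fun r => cs.getD r 0 == 0) then
      pvPassB occ (PySem.Set.add s p.1) (pvDecr cs (occ.getD p.1 [])) true rest
    else pvPassB occ s cs b rest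

-- 'while changed'; same sufficient fuel as A's loop (a changed round grows the nullable set,
-- bounded by the number of production entries), the fuel-0 case is never reached
def pvLoopB (occ : PySem.Dict String (List (List String))) (table : List (String × List (List String))) :
    Nat → PySem.Set String × PySem.Dict (List String) Int → PySem.Set String
  | 0, st => st.1
  | n+1, st =>
    let r := pvPassB occ st.1 st.2 false table
    if r.2.2 then pvLoopB occ table n (r.1, r.2.1) else r.1

def compute_nullable_nonterminals_py_alt (productions : List (String × List (List String))) : List String :=
  let nul := pvEpsB PySem.Set.empty productions
  let bld := pvBuildB nul PySem.Dict.empty PySem.Dict.empty [] productions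
  pvLoopB bld.2.1 bld.2.2 (productions.length + 1) (nul, bld.1)

-- ===== PRECONDITION & SPEC =====
def Spec_compute_nullable_nonterminals_py (productions : List (String × List (List String))) (out : List String) : Prop := out = compute_nullable_nonterminals_py_alt productions
instance (productions : List (String × List (List String))) (out : List String) : Decidable (Spec_compute_nullable_nonterminals_py productions out) := by unfold Spec_compute_nullable_nonterminals_py; infer_instance

-- ===== CLAIM (what is proved, stated in full; the proofs are below) =====
def Claim_equal_compute_nullable_nonterminals_py : Prop := ∀ (productions : List (String × List (List String))), Dom_compute_nullable_nonterminals_py productions → Spec_compute_nullable_nonterminals_py productions (compute_nullable_nonterminals_py productions)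

-- ===== LEMMAS AND PROOFS =====

-- proof-side abbreviations
def pvCnt (s : PySem.Set String) (r : List String) : Nat :=
  (r.filter (fun x => !PySem.Set.contains s x)).length

def pvIsRhs (prods : List (String × List (List String))) (r : List String) : Prop :=
  r ≠ [] ∧ ∃ p ∈ prods, r ∈ p.2

-- loop invariant: each counter holds the number of not-yet-nullable symbol occurrences
def pvLInv (prods : List (String × List (List String))) (s : PySem.Set String)
    (cs : PySem.Dict (List String) Int) : Prop :=
  ∀ r, pvIsRhs prods r → cs.getD r 0 = (pvCnt s r : Int)

-- the occurrence index: occ[sym] holds each rhs once per occurrence of sym in it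
def pvOccP (prods : List (String × List (List String))) (nul : PySem.Set String)
    (occ : PySem.Dict String (List (List String))) : Prop :=
  ∀ sym, sym ∉ nul → ∀ r, pvIsRhs prods r → (occ.getD sym []).count r = r.count sym

-- the table B's while loop iterates
def pvTableOf (nul : PySem.Set String) (prods : List (String × List (List String))) :
    List (String × List (List String)) :=
  (prods.filter (fun p => !(p.2.filter (fun r => !r.isEmpty)).isEmpty && !PySem.Set.contains nul p.1)).map
    (fun p => (p.1, p.2.filter (fun r => !r.isEmpty)))

-- build-time invariant on counters and the occurrence index
def pvBInv (nul : PySem.Set String) (cs : PySem.Dict (List String) Int)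
    (occ : PySem.Dict String (List (List String))) : Prop :=
  (∀ r, cs.contains r = true → cs.getD r 0 = (pvCnt nul r : Int)) ∧
  (∀ sym, PySem.Set.contains nul sym = false →
    ∀ r, (occ.getD sym []).count r = if cs.contains r = true then r.count sym else 0)

theorem pvEps_eq (l : List (String × List (List String))) (s : PySem.Set String) :
    pvEpsB s l = pvInitA s l := by
  induction l generalizing s with
  | nil => rfl
  | cons p rest ih => simp only [pvEpsB, pvInitA]; exact ih _

theorem pvCnt_eq_zero (s : PySem.Set String) (r : List String) :
    (pvCnt s r = 0) ↔ (r.all (fun sym => PySem.Set.contains s sym) = true) := by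
  simp [pvCnt, List.length_eq_zero_iff, List.filter_eq_nil_iff, List.all_eq_true]

theorem pvCnt_add (s : PySem.Set String) (r : List String) (x : String) (hx : x ∉ s) :
    pvCnt s r = pvCnt (PySem.Set.add s x) r + r.count x := by
  induction r with
  | nil => simp [pvCnt]
  | cons y t ih =>
    have hmem : (y ∈ PySem.Set.add s x) ↔ (y ∈ s ∨ y = x) := PySem.Set.mem_add s x y
    unfold pvCnt
    rw [List.filter_cons, List.filter_cons, List.count_cons]
    by_cases hys : y ∈ s
    · have h1 : PySem.Set.contains s y = true := (PySem.Set.contains_iff s y).mpr hys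
      have h2 : PySem.Set.contains (PySem.Set.add s x) y = true :=
        (PySem.Set.contains_iff _ y).mpr (hmem.mpr (Or.inl hys))
      have hyx : (y == x) = false := by
        refine beq_eq_false_iff_ne.mpr (fun h => hx (h ▸ hys))
      unfold pvCnt at ih
      simp [hyx, hys]
      simp [hys] at ih
      omega
    · have h1 : PySem.Set.contains s y = false :=
        Bool.eq_false_iff.mpr (fun h => hys ((PySem.Set.contains_iff s y).mp h))
      unfold pvCnt at ih
      by_cases hyx : y = x
      · subst hyx
        have h2 : PySem.Set.contains (PySem.Set.add s y) y = true :=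
          (PySem.Set.contains_iff _ y).mpr (hmem.mpr (Or.inr rfl))
        simp [h1, h2, hys]
        simp [hys] at ih
        omega
      · have h2 : PySem.Set.contains (PySem.Set.add s x) y = false :=
          Bool.eq_false_iff.mpr (fun h => ((hmem.mp ((PySem.Set.contains_iff _ y).mp h)).elim hys hyx))
        have hbx : (y == x) = false := beq_eq_false_iff_ne.mpr hyx
        simp [h1, h2, hbx, hys, hyx]
        simp [hys] at ih
        omega

theorem pvDecr_getD (L : List (List String)) (cs : PySem.Dict (List String) Int) (r0 : List String) :
    (pvDecr cs L).getD r0 0 = cs.getD r0 0 - (L.count r0 : Int) := by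
  induction L generalizing cs with
  | nil => simp [pvDecr]
  | cons r t ih =>
    show (pvDecr (cs.insert r (cs.getD r 0 - 1)) t).getD r0 0 = _
    rw [ih, PySem.Dict.getD_insert, List.count_cons]
    by_cases h : r0 = r
    · subst h; simp; push_cast; ring
    · simp [h]
      exact fun hh => h hh.symm

-- inner scan: the returned count and the occurrence-index extension, in closed form
theorem pvScanSym_fold (nul : PySem.Set String) (r0 : List String) (l : List String)
    (occ : PySem.Dict String (List (List String))) (c : Int) :
    (l.foldl (pvScanSym nul r0) (occ, c)).2
        = c + ((l.filter (fun x => !PySem.Set.contains nul x)).length : Int) ∧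
    ∀ sym, (l.foldl (pvScanSym nul r0) (occ, c)).1.getD sym []
        = occ.getD sym [] ++
          List.replicate (if PySem.Set.contains nul sym then 0 else l.count sym) r0 := by
  induction l generalizing occ c with
  | nil => simp
  | cons x t ih =>
    simp only [List.foldl_cons]
    by_cases hx : PySem.Set.contains nul x = true
    · rw [show pvScanSym nul r0 (occ, c) x = (occ, c) from by unfold pvScanSym; rw [if_pos hx]]
      obtain ⟨h1, h2⟩ := ih occ c
      refine ⟨?_, ?_⟩
      · rw [h1, List.filter_cons, if_neg (by rw [hx]; simp)]
      · intro sym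
        rw [h2 sym]
        by_cases hs : PySem.Set.contains nul sym = true
        · simp [(PySem.Set.contains_iff nul sym).mp hs]
        · have hxs : x ≠ sym := fun h => hs (h ▸ hx)
          simp [hs, List.count_cons, hxs]
    · have hx' : PySem.Set.contains nul x = false := Bool.eq_false_iff.mpr hx
      rw [show pvScanSym nul r0 (occ, c) x
            = (occ.modify x [] (fun l => l ++ [r0]), c + 1) from by
          unfold pvScanSym; rw [if_neg hx]]
      obtain ⟨h1, h2⟩ := ih (occ.modify x [] (fun l => l ++ [r0])) (c + 1)
      refine ⟨?_, ?_⟩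
      · rw [h1, List.filter_cons, if_pos (by rw [hx']; simp)]
        simp
        push_cast
        ring
      · intro sym
        rw [h2 sym, PySem.Dict.getD_modify]
        by_cases hsx : sym = x
        · subst hsx
          rw [if_pos rfl]
          have hmem : sym ∉ nul := fun h => hx ((PySem.Set.contains_iff nul sym).mpr h)
          simp [hmem, List.count_cons, List.replicate_succ, List.append_assoc]
        · rw [if_neg hsx]
          have hbx : (x == sym) = false := beq_eq_false_iff_ne.mpr (fun h => hsx h.symm)
          simp [List.count_cons, hbx]

theorem pvScanRhs_step (nul : PySem.Set String) (st : PySem.Dict (List String) Int × PySem.Dict String (List (List String)))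
    (r : List String) (h : pvBInv nul st.1 st.2) :
    pvBInv nul (pvScanRhs nul st r).1 (pvScanRhs nul st r).2 ∧
    (pvScanRhs nul st r).1.contains r = true ∧
    (∀ r', st.1.contains r' = true → (pvScanRhs nul st r).1.contains r' = true) := by
  by_cases hc : st.1.contains r = true
  · rw [show pvScanRhs nul st r = st from by unfold pvScanRhs; rw [if_pos hc]]
    exact ⟨h, hc, fun _ h' => h'⟩
  · have hstep : pvScanRhs nul st r
        = (st.1.insert r (r.foldl (pvScanSym nul r) (st.2, 0)).2,
           (r.foldl (pvScanSym nul r) (st.2, 0)).1) := by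
      unfold pvScanRhs; rw [if_neg hc]
    obtain ⟨hf1, hf2⟩ := pvScanSym_fold nul r r st.2 0
    rw [hstep]
    refine ⟨⟨?_, ?_⟩, ?_, ?_⟩
    · intro r' hr'
      rw [PySem.Dict.getD_insert]
      by_cases he : r' = r
      · subst he
        rw [if_pos rfl, hf1]
        simp [pvCnt]
      · rw [if_neg he]
        apply h.1
        rw [PySem.Dict.contains_insert] at hr'
        simpa [he] using hr'
    · intro sym hsym r'
      rw [hf2 sym, hsym, List.count_append, h.2 sym hsym r', PySem.Dict.contains_insert]
      by_cases he : r' = r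
      · subst he
        have : st.1.contains r' = false := Bool.eq_false_iff.mpr hc
        simp [this, List.count_replicate]
      · have hbe : (r' == r) = false := beq_eq_false_iff_ne.mpr he
        simp [hbe, List.count_replicate, he]
        exact fun hh => absurd hh.symm he
    · exact PySem.Dict.contains_insert_self _ _ _
    · intro r' hr'
      rw [PySem.Dict.contains_insert, hr']
      simp

theorem pvScanRhs_fold (nul : PySem.Set String) (rl : List (List String))
    (st : PySem.Dict (List String) Int × PySem.Dict String (List (List String)))
    (h : pvBInv nul st.1 st.2) :
    pvBInv nul (rl.foldl (pvScanRhs nul) st).1 (rl.foldl (pvScanRhs nul) st).2 ∧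
    (∀ r ∈ rl, (rl.foldl (pvScanRhs nul) st).1.contains r = true) ∧
    (∀ r', st.1.contains r' = true → (rl.foldl (pvScanRhs nul) st).1.contains r' = true) := by
  induction rl generalizing st with
  | nil => exact ⟨h, by simp, fun _ h' => h'⟩
  | cons r t ih =>
    obtain ⟨hstep, hcr, hmono⟩ := pvScanRhs_step nul st r h
    obtain ⟨ih1, ih2, ih3⟩ := ih (pvScanRhs nul st r) hstep
    refine ⟨ih1, ?_, fun r' hr' => ih3 r' (hmono r' hr')⟩
    intro r'' hr''
    rcases List.mem_cons.mp hr'' with rfl | hmem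
    · exact ih3 r'' hcr
    · exact ih2 r'' hmem

theorem pvBuildB_char (nul : PySem.Set String) (l : List (String × List (List String)))
    (cs : PySem.Dict (List String) Int) (occ : PySem.Dict String (List (List String)))
    (table : List (String × List (List String))) (h : pvBInv nul cs occ) :
    pvBInv nul (pvBuildB nul cs occ table l).1 (pvBuildB nul cs occ table l).2.1 ∧
    (∀ p ∈ l, ∀ r ∈ p.2, r ≠ [] → (pvBuildB nul cs occ table l).1.contains r = true) ∧
    (∀ r', cs.contains r' = true → (pvBuildB nul cs occ table l).1.contains r' = true) ∧
    (pvBuildB nul cs occ table l).2.2 = table ++ pvTableOf nul l := by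
  induction l generalizing cs occ table with
  | nil => exact ⟨h, by simp, fun _ h' => h', by simp [pvBuildB, pvTableOf]⟩
  | cons p rest ih =>
    have hfold := pvScanRhs_fold nul (p.2.filter (fun r => !r.isEmpty)) (cs, occ) h
    have hunf : pvBuildB nul cs occ table (p :: rest)
        = pvBuildB nul ((p.2.filter (fun r => !r.isEmpty)).foldl (pvScanRhs nul) (cs, occ)).1
            ((p.2.filter (fun r => !r.isEmpty)).foldl (pvScanRhs nul) (cs, occ)).2
            (if !(p.2.filter (fun r => !r.isEmpty)).isEmpty && !PySem.Set.contains nul p.1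
              then table ++ [(p.1, p.2.filter (fun r => !r.isEmpty))] else table) rest := rfl
    obtain ⟨ih1, ih2, ih3, ih4⟩ := ih _ _
      (if !(p.2.filter (fun r => !r.isEmpty)).isEmpty && !PySem.Set.contains nul p.1
        then table ++ [(p.1, p.2.filter (fun r => !r.isEmpty))] else table) hfold.1
    rw [hunf]
    refine ⟨ih1, ?_, ?_, ?_⟩
    · intro q hq r hr hne
      rcases List.mem_cons.mp hq with rfl | hmem
      · refine ih3 r (hfold.2.1 r ?_)
        refine List.mem_filter.mpr ⟨hr, by simpa using hne⟩
      · exact ih2 q hmem r hr hne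
    · intro r' hr'
      exact ih3 r' (hfold.2.2 r' hr')
    · rw [ih4]
      unfold pvTableOf
      rw [List.filter_cons]
      by_cases hq : (!(p.2.filter (fun r => !r.isEmpty)).isEmpty && !PySem.Set.contains nul p.1) = true
      · rw [if_pos hq, if_pos hq, List.map_cons, List.append_assoc, List.singleton_append]
      · rw [if_neg hq, if_neg hq]

theorem pvAnyCongr {α : Type} (f g : α → Bool) (l : List α) (h : ∀ x ∈ l, f x = g x) :
    l.any f = l.any g := by
  induction l with
  | nil => rfl
  | cons x t ih =>
    simp only [List.any_cons, h x List.mem_cons_self,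
      ih (fun y hy => h y (List.mem_cons_of_mem x hy))]

theorem pvCondB_eq (prods : List (String × List (List String))) (s : PySem.Set String)
    (cs : PySem.Dict (List String) Int) (hinv : pvLInv prods s cs)
    (p : String × List (List String)) (hp : ∀ r ∈ p.2, r ≠ [] → pvIsRhs prods r) :
    (p.2.filter (fun r => !r.isEmpty)).any (fun r => cs.getD r 0 == 0) = pvCondA s p.2 := by
  unfold pvCondA
  rw [List.any_filter]
  apply pvAnyCongr
  intro r hr
  by_cases hre : r.isEmpty = true
  · simp [hre]
  · have hne : r ≠ [] := by simpa [List.isEmpty_iff] using hre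
    have hrhs : pvIsRhs prods r := hp r hr hne
    rw [hinv r hrhs]
    cases hall : r.all (fun sym => PySem.Set.contains s sym) with
    | false =>
      have hnz : pvCnt s r ≠ 0 := fun h0 => by
        rw [(pvCnt_eq_zero s r).mp h0] at hall; cases hall
      simp [hnz]
    | true =>
      have hz : pvCnt s r = 0 := (pvCnt_eq_zero s r).mpr hall
      simp [hz]

theorem pvPass_sim (prods : List (String × List (List String))) (nul : PySem.Set String)
    (occ : PySem.Dict String (List (List String))) (hocc : pvOccP prods nul occ)
    (l : List (String × List (List String)))
    (hl : ∀ p ∈ l, ∀ r ∈ p.2, r ≠ [] → pvIsRhs prods r)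
    (s : PySem.Set String) (cs : PySem.Dict (List String) Int) (b : Bool)
    (hinv : pvLInv prods s cs) (hns : ∀ x ∈ nul, x ∈ s) :
    (pvPassB occ s cs b (pvTableOf nul l)).1 = (pvPassA s b l).1 ∧
    (pvPassB occ s cs b (pvTableOf nul l)).2.2 = (pvPassA s b l).2 ∧
    pvLInv prods (pvPassA s b l).1 (pvPassB occ s cs b (pvTableOf nul l)).2.1 ∧
    (∀ x ∈ nul, x ∈ (pvPassA s b l).1) := by
  induction l generalizing s cs b with
  | nil => exact ⟨rfl, rfl, hinv, hns⟩
  | cons p rest ih =>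
    have hlrest : ∀ q ∈ rest, ∀ r ∈ q.2, r ≠ [] → pvIsRhs prods r :=
      fun q hq => hl q (List.mem_cons_of_mem p hq)
    have hphead : ∀ r ∈ p.2, r ≠ [] → pvIsRhs prods r := hl p List.mem_cons_self
    by_cases hq : (!(p.2.filter (fun r => !r.isEmpty)).isEmpty && !PySem.Set.contains nul p.1) = true
    · have htab : pvTableOf nul (p :: rest)
          = (p.1, p.2.filter (fun r => !r.isEmpty)) :: pvTableOf nul rest := by
        unfold pvTableOf; rw [List.filter_cons, if_pos hq, List.map_cons]
      rw [htab]
      by_cases hcs : PySem.Set.contains s p.1 = true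
      · have hA : pvPassA s b (p :: rest) = pvPassA s b rest := by
          rw [pvPassA, if_pos hcs]
        have hB : pvPassB occ s cs b ((p.1, p.2.filter (fun r => !r.isEmpty)) :: pvTableOf nul rest)
            = pvPassB occ s cs b (pvTableOf nul rest) := by
          rw [pvPassB, if_pos hcs]
        rw [hA, hB]
        exact ih hlrest s cs b hinv hns
      · have hcond := pvCondB_eq prods s cs hinv p hphead
        by_cases hcA : pvCondA s p.2 = true
        · have hcB : (p.2.filter (fun r => !r.isEmpty)).any (fun r => cs.getD r 0 == 0) = true := by
            rw [hcond, hcA]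
          have hA : pvPassA s b (p :: rest) = pvPassA (PySem.Set.add s p.1) true rest := by
            rw [pvPassA, if_neg hcs, if_pos hcA]
          have hB : pvPassB occ s cs b ((p.1, p.2.filter (fun r => !r.isEmpty)) :: pvTableOf nul rest)
              = pvPassB occ (PySem.Set.add s p.1) (pvDecr cs (occ.getD p.1 [])) true (pvTableOf nul rest) := by
            rw [pvPassB, if_neg hcs, if_pos hcB]
          rw [hA, hB]
          have hp1s : p.1 ∉ s := fun hm => hcs ((PySem.Set.contains_iff s p.1).mpr hm)
          have hp1nul : p.1 ∉ nul := fun hm => hp1s (hns _ hm)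
          have hinv' : pvLInv prods (PySem.Set.add s p.1) (pvDecr cs (occ.getD p.1 [])) := by
            intro r hrhs
            rw [pvDecr_getD, hinv r hrhs, hocc p.1 hp1nul r hrhs]
            have hca := pvCnt_add s r p.1 hp1s
            omega
          have hns' : ∀ x ∈ nul, x ∈ PySem.Set.add s p.1 :=
            fun x hx => (PySem.Set.mem_add s p.1 x).mpr (Or.inl (hns x hx))
          exact ih hlrest _ _ true hinv' hns'
        · have hcA' : pvCondA s p.2 = false := Bool.eq_false_iff.mpr hcA
          have hcB : (p.2.filter (fun r => !r.isEmpty)).any (fun r => cs.getD r 0 == 0) = false := by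
            rw [hcond, hcA']
          have hA : pvPassA s b (p :: rest) = pvPassA s b rest := by
            rw [pvPassA, if_neg hcs, if_neg hcA]
          have hB : pvPassB occ s cs b ((p.1, p.2.filter (fun r => !r.isEmpty)) :: pvTableOf nul rest)
              = pvPassB occ s cs b (pvTableOf nul rest) := by
            rw [pvPassB, if_neg hcs, if_neg (by rw [hcB]; exact Bool.false_ne_true)]
          rw [hA, hB]
          exact ih hlrest s cs b hinv hns
    · have htab : pvTableOf nul (p :: rest) = pvTableOf nul rest := by
        unfold pvTableOf; rw [List.filter_cons, if_neg hq]
      have hA : pvPassA s b (p :: rest) = pvPassA s b rest := by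
        by_cases hnp : PySem.Set.contains nul p.1 = true
        · have hcs : PySem.Set.contains s p.1 = true :=
            (PySem.Set.contains_iff s p.1).mpr (hns p.1 ((PySem.Set.contains_iff nul p.1).mp hnp))
          rw [pvPassA, if_pos hcs]
        · have hemp : (p.2.filter (fun r => !r.isEmpty)).isEmpty = true := by
            cases he : (p.2.filter (fun r => !r.isEmpty)).isEmpty
            · exfalso
              apply hq
              rw [he, Bool.eq_false_iff.mpr hnp]
              rfl
            · rfl
          have hcA : pvCondA s p.2 = false := by
            unfold pvCondA
            apply List.any_eq_false.mpr
            intro r hr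
            have := List.filter_eq_nil_iff.mp (List.isEmpty_iff.mp hemp) r hr
            simp only [Bool.not_eq_true] at this
            rw [this]
            simp
          by_cases hcs : PySem.Set.contains s p.1 = true
          · rw [pvPassA, if_pos hcs]
          · rw [pvPassA, if_neg hcs, if_neg (by rw [hcA]; exact Bool.false_ne_true)]
      rw [htab, hA]
      exact ih hlrest s cs b hinv hns

theorem pvLoop_sim (prods : List (String × List (List String))) (nul : PySem.Set String)
    (occ : PySem.Dict String (List (List String))) (hocc : pvOccP prods nul occ) (n : Nat) :
    ∀ (s : PySem.Set String) (cs : PySem.Dict (List String) Int),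
    pvLInv prods s cs → (∀ x ∈ nul, x ∈ s) →
    pvLoopB occ (pvTableOf nul prods) n (s, cs) = pvLoopA prods n s := by
  induction n with
  | zero => intro s cs _ _; rfl
  | succ n ihn =>
    intro s cs hinv hns
    obtain ⟨h1, h2, h3, h4⟩ := pvPass_sim prods nul occ hocc prods
      (fun p hp r hr hne => ⟨hne, p, hp, hr⟩) s cs false hinv hns
    show (if (pvPassB occ s cs false (pvTableOf nul prods)).2.2 = true then
            pvLoopB occ (pvTableOf nul prods) n
              ((pvPassB occ s cs false (pvTableOf nul prods)).1,
               (pvPassB occ s cs false (pvTableOf nul prods)).2.1)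
          else (pvPassB occ s cs false (pvTableOf nul prods)).1)
        = (if (pvPassA s false prods).2 = true then
            pvLoopA prods n (pvPassA s false prods).1 else (pvPassA s false prods).1)
    rw [h1, h2]
    by_cases hch : (pvPassA s false prods).2 = true
    · rw [if_pos hch, if_pos hch]
      exact ihn _ _ h3 h4
    · rw [if_neg hch, if_neg hch]

-- ===== VERDICT (by name: the statement is the Claim_ definition above) =====
theorem compute_nullable_nonterminals_py_spec : Claim_equal_compute_nullable_nonterminals_py := by
  intro prods _
  unfold Spec_compute_nullable_nonterminals_py
  show compute_nullable_nonterminals_py prods = compute_nullable_nonterminals_py_alt prods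
  unfold compute_nullable_nonterminals_py compute_nullable_nonterminals_py_alt
  change pvLoopA prods (prods.length + 1) (pvInitA PySem.Set.empty prods)
      = pvLoopB (pvBuildB (pvEpsB PySem.Set.empty prods) PySem.Dict.empty PySem.Dict.empty [] prods).2.1
          (pvBuildB (pvEpsB PySem.Set.empty prods) PySem.Dict.empty PySem.Dict.empty [] prods).2.2
          (prods.length + 1)
          (pvEpsB PySem.Set.empty prods,
           (pvBuildB (pvEpsB PySem.Set.empty prods) PySem.Dict.empty PySem.Dict.empty [] prods).1)
  rw [pvEps_eq]
  have hbinv0 : pvBInv (pvInitA PySem.Set.empty prods) PySem.Dict.empty PySem.Dict.empty := by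
    constructor
    · intro r hr
      rw [PySem.Dict.contains_empty] at hr
      cases hr
    · intro sym _ r
      rw [PySem.Dict.contains_empty, PySem.Dict.getD_empty]
      simp
  have hchar := pvBuildB_char (pvInitA PySem.Set.empty prods) prods
    PySem.Dict.empty PySem.Dict.empty [] hbinv0
  have hLInv : pvLInv prods (pvInitA PySem.Set.empty prods)
      (pvBuildB (pvInitA PySem.Set.empty prods) PySem.Dict.empty PySem.Dict.empty [] prods).1 := by
    intro r hrhs
    obtain ⟨hne, p, hp, hr⟩ := hrhs
    exact hchar.1.1 r (hchar.2.1 p hp r hr hne)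
  have hOcc : pvOccP prods (pvInitA PySem.Set.empty prods)
      (pvBuildB (pvInitA PySem.Set.empty prods) PySem.Dict.empty PySem.Dict.empty [] prods).2.1 := by
    intro sym hsym r hrhs
    obtain ⟨hne, p, hp, hr⟩ := hrhs
    have hcf : PySem.Set.contains (pvInitA PySem.Set.empty prods) sym = false :=
      Bool.eq_false_iff.mpr (fun h => hsym ((PySem.Set.contains_iff _ sym).mp h))
    rw [hchar.1.2 sym hcf r, if_pos (hchar.2.1 p hp r hr hne)]
  have htab : (pvBuildB (pvInitA PySem.Set.empty prods) PySem.Dict.empty PySem.Dict.empty [] prods).2.2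
      = pvTableOf (pvInitA PySem.Set.empty prods) prods := by
    rw [hchar.2.2.2, List.nil_append]
  rw [htab]
  exact (pvLoop_sim prods (pvInitA PySem.Set.empty prods) _ hOcc (prods.length + 1)
    (pvInitA PySem.Set.empty prods) _ hLInv (fun x h => h)).symm
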